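-- pv_equiv track=rewrite | github.com/NicolasFacciano/TP1_Sintaxis | AFDs.py | automata_asignacion
-- ===== SOURCE A (Python) =====
-- ESTADO_FINAL = "ESTADO FINAL"
--
-- ESTADO_NO_FINAL = "NO ACEPTADO"
--
-- ESTADO_TRAMPA = "EN ESTADO TRAMPA"
--
-- def automata_asignacion(lexema):
--     estado = 0
--     estados_finales = [1, 2, 3]
--     for c in lexema:
--         if estado == 0:
--             if c == ':':
--                 estado = 1
--             elif c == '=':
--                 estado = 3
--             else:
--                 estado = -1
--                 break
--         elif estado == 1:
--             if c == '=':
--                 estado = 2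
--             else:
--                 estado = -1
--                 break
--         else:
--             estado = -1
--             break
--
--     if estado == -1:
--         return ESTADO_TRAMPA
--     if estado in estados_finales:
--         return ESTADO_FINAL
--     return ESTADO_NO_FINAL
-- ===== SOURCE B (Python) =====
-- ESTADO_FINAL = "ESTADO FINAL"
--
-- ESTADO_NO_FINAL = "NO ACEPTADO"
--
-- ESTADO_TRAMPA = "EN ESTADO TRAMPA"
--
-- def automata_asignacion(lexema):
--     # The DFA accepts exactly {":", ":=", "="}; "" stays in the (non-final) start state.
--     if not lexema:
--         return ESTADO_NO_FINAL
--     if lexema in (":", ":=", "="):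
--         return ESTADO_FINAL
--     return ESTADO_TRAMPA
-- ===== Notes on version B (the rewrite author's own statement) =====
-- stated objective: simpler
-- what changed: Replaced the char-by-char DFA state loop with a closed-form classification: empty input -> NO ACEPTADO, membership in the finite accepted set {":", ":=", "="} -> ESTADO FINAL, everything else -> EN ESTADO TRAMPA.
import Mathlib
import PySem

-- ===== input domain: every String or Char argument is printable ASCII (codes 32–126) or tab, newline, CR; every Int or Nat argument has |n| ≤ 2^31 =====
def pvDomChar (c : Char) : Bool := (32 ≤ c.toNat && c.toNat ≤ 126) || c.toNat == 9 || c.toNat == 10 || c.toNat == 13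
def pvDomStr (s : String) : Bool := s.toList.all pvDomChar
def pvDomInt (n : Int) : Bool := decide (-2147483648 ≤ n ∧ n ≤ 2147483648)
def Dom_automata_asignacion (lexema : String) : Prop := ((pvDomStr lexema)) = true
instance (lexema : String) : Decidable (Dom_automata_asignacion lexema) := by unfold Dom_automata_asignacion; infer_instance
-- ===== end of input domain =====

-- B replaces A's char-by-char DFA loop with a closed-form finite-set classification (objective: simpler).

-- ===== PORT A =====
-- the for-loop of A: walks the chars updating `estado`; `break` = stop returning -1
def automata_asignacion_loop : Int → List Char → Int
  | estado, [] => estado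
  | estado, c :: cs =>
    if estado = 0 then
      if c = ':' then automata_asignacion_loop 1 cs
      else if c = '=' then automata_asignacion_loop 3 cs
      else (-1)
    else if estado = 1 then
      if c = '=' then automata_asignacion_loop 2 cs
      else (-1)
    else (-1)

def automata_asignacion (lexema : String) : String :=
  let estados_finales : List Int := [1, 2, 3]
  let estado := automata_asignacion_loop 0 lexema.toList
  if estado = -1 then "EN ESTADO TRAMPA"
  else if estado ∈ estados_finales then "ESTADO FINAL"
  else "NO ACEPTADO"

-- ===== PORT B =====
def automata_asignacion_alt (lexema : String) : String :=
  if lexema = "" then "NO ACEPTADO"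
  else if lexema = ":" ∨ lexema = ":=" ∨ lexema = "=" then "ESTADO FINAL"
  else "EN ESTADO TRAMPA"

-- ===== PRECONDITION & SPEC =====
def Spec_automata_asignacion (lexema : String) (out : String) : Prop := out = automata_asignacion_alt lexema
instance (lexema : String) (out : String) : Decidable (Spec_automata_asignacion lexema out) := by unfold Spec_automata_asignacion; infer_instance

-- ===== CLAIM (what is proved, stated in full; the proofs are below) =====
def Claim_equal_automata_asignacion : Prop := ∀ (lexema : String), Dom_automata_asignacion lexema → Spec_automata_asignacion lexema (automata_asignacion lexema)

-- ===== LEMMAS AND PROOFS =====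

-- string equality with a literal, read on the character list
theorem str_eq_iff_toList (s : String) (t : String) : s = t ↔ s.toList = t.toList :=
  ⟨fun h => h ▸ rfl, String.toList_inj.mp⟩

-- ===== VERDICT (by name: the statement is the Claim_ definition above) =====
theorem automata_asignacion_spec : Claim_equal_automata_asignacion := by
  intro lexema _
  unfold Spec_automata_asignacion automata_asignacion automata_asignacion_alt
  simp only [str_eq_iff_toList]
  match h : lexema.toList with
  | [] => simp [automata_asignacion_loop]
  | [c] =>
    by_cases h1 : c = ':' <;> by_cases h2 : c = '=' <;>
      simp_all [automata_asignacion_loop]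
  | [c, d] =>
    by_cases h1 : c = ':' <;> by_cases h2 : c = '=' <;> by_cases h3 : d = '=' <;>
      simp_all [automata_asignacion_loop]
  | c :: d :: e :: rest =>
    by_cases h1 : c = ':' <;> by_cases h2 : c = '=' <;> by_cases h3 : d = '=' <;>
      simp_all [automata_asignacion_loop]
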